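-- pv_equiv track=rewrite | github.com/federissoo/KAPRA-TimeSeries-Anonymization | k-anon.py | isLDiverse
-- ===== SOURCE A (Python) =====
-- def isLDiverse(dataset, l, QI, SD):
--     ldiverse = False
--
--     # Create the blocks with the same QI
--     groups = {}
--     for d in dataset:
--         key = []
--         for qi in QI:
--             key.append(str(d[qi]))
--         key = "-".join(key)
--         if key not in groups:
--             groups[key] = []
--         groups[key].append(d)
--
--     # check the diversity for each group
--     # count the number of different SD in each group
--     # choose the smallest (fewer diverse) group
--     smallest_diverse = len(dataset)
--
--     for group in groups:
--         sensitive_data = set()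
--
--         # Iterate over all the record in the group
--         for record in groups[group]:
--             record_sd = []
--             # Iterate over all the SD attributes
--             # Create a subset with only the SD
--             for sd in SD:
--                 record_sd.append(str(record[sd]))
--             record_sd = "-".join(record_sd)
--
--             sensitive_data.add(record_sd)
--
--         if len(sensitive_data) < smallest_diverse:
--             smallest_diverse = len(sensitive_data)
--
--     if smallest_diverse >= l:
--         ldiverse = True
--     return ldiverse
-- ===== SOURCE B (Python) =====
-- def isLDiverse(dataset, l, QI, SD):
--     # Project every record to its (QI-key, SD-key) string pair and dedup globally:
--     # a group's diversity is then just how often its QI-key occurs among the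
--     # distinct pairs, so one frequency count replaces grouping the records.
--     pairs = {("-".join(str(d[qi]) for qi in QI),
--               "-".join(str(d[sd]) for sd in SD)) for d in dataset}
--     counts = {}
--     for q, _ in pairs:
--         counts[q] = counts.get(q, 0) + 1
--     return min(counts.values(), default=0) >= l
-- ===== Notes on version B (the rewrite author's own statement) =====
-- stated objective: alternative
-- what changed: Instead of grouping whole records into per-QI-key lists and re-scanning each group for its set of SD strings, B projects every record to a flat (QI-key, SD-key) pair, dedups those pairs globally with one set, and takes the minimum frequency of a QI-key among the distinct pairs.
import Mathlib
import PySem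

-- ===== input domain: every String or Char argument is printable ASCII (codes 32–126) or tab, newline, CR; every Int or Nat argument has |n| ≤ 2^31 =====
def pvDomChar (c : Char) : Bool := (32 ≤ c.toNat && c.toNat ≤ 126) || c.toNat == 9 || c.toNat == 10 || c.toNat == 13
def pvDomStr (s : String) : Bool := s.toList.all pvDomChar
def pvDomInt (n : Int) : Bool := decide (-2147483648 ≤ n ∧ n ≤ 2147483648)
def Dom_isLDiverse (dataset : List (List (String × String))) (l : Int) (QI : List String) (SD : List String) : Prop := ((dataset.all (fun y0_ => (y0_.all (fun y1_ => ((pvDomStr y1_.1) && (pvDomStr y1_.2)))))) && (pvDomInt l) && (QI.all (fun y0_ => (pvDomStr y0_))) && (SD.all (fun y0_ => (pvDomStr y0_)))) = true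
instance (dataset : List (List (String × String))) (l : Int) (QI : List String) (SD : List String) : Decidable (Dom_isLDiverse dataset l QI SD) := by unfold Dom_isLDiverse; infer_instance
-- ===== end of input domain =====

-- B dedups the flat (QI-key, SD-key) pairs globally and takes the minimum frequency of a
-- QI-key among the distinct pairs, instead of A's per-QI-key record lists re-scanned for
-- distinct SD strings; a genuinely different data organisation of the same cost.

-- ===== PORT A =====
-- "-".join(str(d[a]) for a in attrs); Pre_ guarantees every key is present (Python raises
-- KeyError otherwise), so the "" default of getD is never reached on admitted inputs.
def pvKeyA (d : List (String × String)) (attrs : List String) : String :=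
  PySem.Str.join "-" (attrs.map (fun a => (PySem.Dict.mk d).getD a ""))

def isLDiverse (dataset : List (List (String × String))) (l : Int) (QI : List String) (SD : List String) : Bool :=
  -- first loop: groups[key].append(d) (creating groups[key] = [] on a fresh key)
  let groups : PySem.Dict String (List (List (String × String))) :=
    dataset.foldl (fun g d =>
      let key := pvKeyA d QI
      let g := if g.contains key then g else g.insert key []
      g.insert key (g.getD key [] ++ [d])) PySem.Dict.empty
  -- second loop: for group in groups, rebuild the set of SD strings, track the smallest
  let smallest : Int :=
    groups.keys.foldl (fun sm key =>
      let sens : PySem.Set String :=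
        (groups.getD key []).foldl (fun s record => PySem.Set.add s (pvKeyA record SD)) PySem.Set.empty
      if (sens.length : Int) < sm then (sens.length : Int) else sm)
      (dataset.length : Int)
  decide (l ≤ smallest)

-- ===== PORT B =====
def pvKeyB (d : List (String × String)) (attrs : List String) : String :=
  PySem.Str.join "-" (attrs.map (fun a => (PySem.Dict.mk d).getD a ""))

def isLDiverse_alt (dataset : List (List (String × String))) (l : Int) (QI : List String) (SD : List String) : Bool :=
  -- pairs = {(qikey(d), sdkey(d)) for d in dataset}
  let pairs : PySem.Set (String × String) :=
    PySem.Set.ofList (dataset.map (fun d => (pvKeyB d QI, pvKeyB d SD)))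
  -- for (q, _) in pairs: counts[q] = counts.get(q, 0) + 1   (min over values is order-blind,
  -- so folding the set in insertion order is exact for Python's hash order)
  let counts : PySem.Dict String Int :=
    pairs.foldl (fun c p => c.insert p.1 (c.getD p.1 0 + 1)) PySem.Dict.empty
  -- min(counts.values(), default=0) >= l
  decide (l ≤ PySem.List.minD counts.values (fun x => x) 0)

-- ===== PRECONDITION & SPEC =====
-- Pre_ excludes exactly the inputs where Python A raises KeyError: a record missing some QI or SD attribute.
def Pre_isLDiverse (dataset : List (List (String × String))) (l : Int) (QI : List String) (SD : List String) : Prop :=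
  ∀ d ∈ dataset, (∀ q ∈ QI, q ∈ d.map Prod.fst) ∧ (∀ s ∈ SD, s ∈ d.map Prod.fst)
instance (dataset : List (List (String × String))) (l : Int) (QI : List String) (SD : List String) : Decidable (Pre_isLDiverse dataset l QI SD) := by unfold Pre_isLDiverse; infer_instance

def pvWitness_isLDiverse : (List (List (String × String))) × Int × List String × List String :=
  ([[("a", "x"), ("b", "u")], [("a", "x"), ("b", "v")]], 2, ["a"], ["b"])

def Spec_isLDiverse (dataset : List (List (String × String))) (l : Int) (QI : List String) (SD : List String) (out : Bool) : Prop := out = isLDiverse_alt dataset l QI SD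
instance (dataset : List (List (String × String))) (l : Int) (QI : List String) (SD : List String) (out : Bool) : Decidable (Spec_isLDiverse dataset l QI SD out) := by unfold Spec_isLDiverse; infer_instance

-- ===== CLAIM (what is proved, stated in full; the proofs are below) =====
def Claim_equal_isLDiverse : Prop := ∀ (dataset : List (List (String × String))) (l : Int) (QI : List String) (SD : List String), Dom_isLDiverse dataset l QI SD → Pre_isLDiverse dataset l QI SD → Spec_isLDiverse dataset l QI SD (isLDiverse dataset l QI SD)

-- ===== LEMMAS AND PROOFS =====

-- dedup (Set.ofList) commutes with mapping under a later dedup, with filtering, and with an injective map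
theorem pv_ofList_map_ofList {α β : Type} [BEq α] [LawfulBEq α] [BEq β] [LawfulBEq β]
    (f : α → β) (xs : List α) :
    PySem.Set.ofList ((PySem.Set.ofList xs).map f) = PySem.Set.ofList (xs.map f) := by
  induction xs using List.reverseRecOn with
  | nil => rfl
  | append_singleton xs x ih =>
    rw [PySem.Set.ofList_append_singleton, List.map_append, List.map_singleton,
      PySem.Set.ofList_append_singleton]
    by_cases hx : x ∈ PySem.Set.ofList xs
    · rw [PySem.Set.add_of_mem hx, ih, PySem.Set.add_of_mem]
      exact (PySem.Set.mem_ofList _ _).2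
        (List.mem_map_of_mem ((PySem.Set.mem_ofList _ _).1 hx))
    · rw [PySem.Set.add_of_not_mem hx, List.map_append, List.map_singleton,
        PySem.Set.ofList_append_singleton, ih]

theorem pv_filter_ofList {α : Type} [BEq α] [LawfulBEq α] (p : α → Bool) (xs : List α) :
    (PySem.Set.ofList xs).filter p = PySem.Set.ofList (xs.filter p) := by
  induction xs using List.reverseRecOn with
  | nil => rfl
  | append_singleton xs x ih =>
    rw [PySem.Set.ofList_append_singleton, List.filter_append]
    by_cases hx : x ∈ PySem.Set.ofList xs
    · rw [PySem.Set.add_of_mem hx, ih]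
      by_cases hp : p x = true
      · simp only [List.filter_singleton, hp, cond_true]
        rw [PySem.Set.ofList_append_singleton, PySem.Set.add_of_mem]
        exact (PySem.Set.mem_ofList _ _).2
          (List.mem_filter.2 ⟨(PySem.Set.mem_ofList _ _).1 hx, hp⟩)
      · simp [hp]
    · rw [PySem.Set.add_of_not_mem hx, List.filter_append, ih]
      by_cases hp : p x = true
      · simp only [List.filter_singleton, hp, cond_true]
        rw [PySem.Set.ofList_append_singleton, PySem.Set.add_of_not_mem]
        intro hmem
        exact hx ((PySem.Set.mem_ofList _ _).2
          (List.mem_filter.1 ((PySem.Set.mem_ofList _ _).1 hmem)).1)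
      · simp [hp]

theorem pv_ofList_map_inj {α β : Type} [BEq α] [LawfulBEq α] [BEq β] [LawfulBEq β]
    {f : α → β} (hf : Function.Injective f) (xs : List α) :
    PySem.Set.ofList (xs.map f) = (PySem.Set.ofList xs).map f := by
  induction xs using List.reverseRecOn with
  | nil => rfl
  | append_singleton xs x ih =>
    rw [List.map_append, List.map_singleton, PySem.Set.ofList_append_singleton, ih,
      PySem.Set.ofList_append_singleton]
    by_cases hx : x ∈ PySem.Set.ofList xs
    · rw [PySem.Set.add_of_mem hx, PySem.Set.add_of_mem (List.mem_map_of_mem hx)]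
    · rw [PySem.Set.add_of_not_mem hx, List.map_append, List.map_singleton,
        PySem.Set.add_of_not_mem]
      intro hmem
      obtain ⟨y, hy, hyx⟩ := List.mem_map.1 hmem
      exact hx (hf hyx ▸ hy)

-- A's grouping step is one dict modify
theorem pv_stepA_eq_modify (QI : List String) (g : PySem.Dict String (List (List (String × String))))
    (d : List (String × String)) :
    (let key := pvKeyA d QI
     let g' := if g.contains key then g else g.insert key []
     g'.insert key (g'.getD key [] ++ [d]))
      = g.modify (pvKeyA d QI) [] (· ++ [d]) := by
  show (let key := pvKeyA d QI
        let g' := if g.contains key then g else g.insert key []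
        g'.insert key (g'.getD key [] ++ [d]))
      = g.insert (pvKeyA d QI) (g.getD (pvKeyA d QI) [] ++ [d])
  by_cases hc : g.contains (pvKeyA d QI) = true
  · simp [hc]
  · simp only [Bool.not_eq_true] at hc
    simp [hc, PySem.Dict.getD_insert_self, PySem.Dict.insert_insert_self,
      PySem.Dict.getD_of_not_contains g [] hc]

-- A's groups dict: each group is the subsequence of records with that QI key
theorem pv_groups_getD (dataset : List (List (String × String))) (QI : List String) (q : String) :
    (dataset.foldl (fun g d =>
        let key := pvKeyA d QI
        let g := if g.contains key then g else g.insert key []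
        g.insert key (g.getD key [] ++ [d])) PySem.Dict.empty).getD q []
      = dataset.filter (fun d => pvKeyA d QI == q) := by
  have hbody : (fun (g : PySem.Dict String (List (List (String × String)))) d =>
      let key := pvKeyA d QI
      let g := if g.contains key then g else g.insert key []
      g.insert key (g.getD key [] ++ [d]))
      = fun g d => g.modify (pvKeyA d QI) [] (· ++ [d]) := by
    funext g d; exact pv_stepA_eq_modify QI g d
  rw [hbody]
  have hmap : dataset.foldl (fun g d => g.modify (pvKeyA d QI) [] (· ++ [d])) PySem.Dict.empty
      = (dataset.map (fun d => (pvKeyA d QI, d))).foldl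
          (fun g p => g.modify p.1 [] (· ++ [p.2])) PySem.Dict.empty := by
    rw [List.foldl_map]
  rw [hmap, PySem.Dict.getD_foldl_modify_append]
  simp [List.filter_map, Function.comp_def]

-- A's key list is the dedup of the QI keys in first-occurrence order
theorem pv_groups_keys (dataset : List (List (String × String))) (QI : List String) :
    (dataset.foldl (fun g d =>
        let key := pvKeyA d QI
        let g := if g.contains key then g else g.insert key []
        g.insert key (g.getD key [] ++ [d])) PySem.Dict.empty).keys
      = PySem.Set.ofList (dataset.map (fun d => pvKeyA d QI)) := by
  have hbody : (fun (g : PySem.Dict String (List (List (String × String)))) d =>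
      let key := pvKeyA d QI
      let g := if g.contains key then g else g.insert key []
      g.insert key (g.getD key [] ++ [d]))
      = fun g d => g.modify (pvKeyA d QI) [] (· ++ [d]) := by
    funext g d; exact pv_stepA_eq_modify QI g d
  rw [hbody]
  rw [PySem.Dict.keys_foldl_modify_key dataset (fun d => pvKeyA d QI) []
    (fun _ d => (· ++ [d])) PySem.Dict.empty]
  rfl

-- A's inner set loop is a dedup of the group's SD keys
theorem pv_sens_eq (SD : List String) (recs : List (List (String × String))) :
    recs.foldl (fun s record => PySem.Set.add s (pvKeyA record SD)) PySem.Set.empty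
      = PySem.Set.ofList (recs.map (fun record => pvKeyA record SD)) := by
  rw [← PySem.Set.update_map_eq_foldl_add, PySem.Set.update_empty]

-- B's per-key count equals the size of A's per-group SD set
theorem pv_count_eq (dataset : List (List (String × String))) (QI SD : List String) (q : String) :
    (((PySem.Set.ofList (dataset.map (fun d => (pvKeyA d QI, pvKeyA d SD)))).map Prod.fst).count q : Int)
      = ((PySem.Set.ofList ((dataset.filter (fun d => pvKeyA d QI == q)).map
          (fun d => pvKeyA d SD))).length : Int) := by
  congr 1
  rw [List.count_eq_countP, List.countP_map, List.countP_eq_length_filter]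
  have h1 : (PySem.Set.ofList (dataset.map (fun d => (pvKeyA d QI, pvKeyA d SD)))).filter
      ((fun x => x == q) ∘ Prod.fst)
      = PySem.Set.ofList ((dataset.map (fun d => (pvKeyA d QI, pvKeyA d SD))).filter
          ((fun x => x == q) ∘ Prod.fst)) :=
    pv_filter_ofList _ _
  rw [h1, List.filter_map]
  have h2 : (((fun (x : String) => x == q) ∘ Prod.fst) ∘ fun d => (pvKeyA d QI, pvKeyA d SD))
      = (fun d => pvKeyA d QI == q) := rfl
  rw [h2]
  have h3 : (dataset.filter (fun d => pvKeyA d QI == q)).map (fun d => (pvKeyA d QI, pvKeyA d SD))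
      = ((dataset.filter (fun d => pvKeyA d QI == q)).map (fun d => pvKeyA d SD)).map
          (fun s => (q, s)) := by
    rw [List.map_map]
    apply List.map_congr_left
    intro d hd
    have := (List.mem_filter.1 hd).2
    simp only [beq_iff_eq] at this
    simp [Function.comp, this]
  rw [h3, pv_ofList_map_inj (fun a b h => by simpa using congrArg Prod.snd h)]
  rw [List.length_map]

-- running min with an upper-bound seed is Python's min(..., default=0) on a nonempty list
theorem pv_minfold (cs : List Int) (N : Int) (hne : cs ≠ []) (hb : ∀ c ∈ cs, c ≤ N) :
    cs.foldl (fun sm c => if c < sm then c else sm) N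
      = (PySem.List.min? cs (fun x => x)).getD 0 := by
  cases cs with
  | nil => exact absurd rfl hne
  | cons x t =>
    rw [PySem.List.min?_id_cons]
    have hfx : (fun (sm c : Int) => if c < sm then c else sm) = min := by
      funext sm c
      simp only [min_def]
      split_ifs <;> omega
    have hx : x ≤ N := hb x (by simp)
    simp only [List.foldl_cons, hfx, Option.getD_some]
    have : min N x = x := by omega
    rw [this]

-- ===== VERDICT (by name: the statement is the Claim_ definition above) =====
theorem isLDiverse_spec : Claim_equal_isLDiverse := by
  intro dataset l QI SD _ _
  show isLDiverse dataset l QI SD = isLDiverse_alt dataset l QI SD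
  show decide (l ≤ (dataset.foldl (fun g d =>
      let key := pvKeyA d QI
      let g := if g.contains key then g else g.insert key []
      g.insert key (g.getD key [] ++ [d])) PySem.Dict.empty).keys.foldl
      (fun sm key =>
        let sens : PySem.Set String :=
          ((dataset.foldl (fun g d =>
              let key := pvKeyA d QI
              let g := if g.contains key then g else g.insert key []
              g.insert key (g.getD key [] ++ [d])) PySem.Dict.empty).getD key []).foldl
            (fun s record => PySem.Set.add s (pvKeyA record SD)) PySem.Set.empty
        if (sens.length : Int) < sm then (sens.length : Int) else sm)
      (dataset.length : Int))
    = decide (l ≤ PySem.List.minD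
        ((PySem.Set.ofList (dataset.map (fun d => (pvKeyA d QI, pvKeyA d SD)))).foldl
          (fun c p => c.insert p.1 (c.getD p.1 0 + 1)) PySem.Dict.empty).values (fun x => x) 0)
  set cF : String → Int := fun q =>
    ((PySem.Set.ofList ((dataset.filter (fun d => pvKeyA d QI == q)).map
        (fun d => pvKeyA d SD))).length : Int) with hcF
  set pl : List (String × String) := dataset.map (fun d => (pvKeyA d QI, pvKeyA d SD)) with hpl
  set keyList : List String := PySem.Set.ofList (dataset.map (fun d => pvKeyA d QI)) with hkl
  -- A side: the second loop is a running min over cF of the key list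
  have hbody : (fun (sm : Int) (key : String) =>
      let sens : PySem.Set String :=
        ((dataset.foldl (fun g d =>
            let key := pvKeyA d QI
            let g := if g.contains key then g else g.insert key []
            g.insert key (g.getD key [] ++ [d])) PySem.Dict.empty).getD key []).foldl
          (fun s record => PySem.Set.add s (pvKeyA record SD)) PySem.Set.empty
      if (sens.length : Int) < sm then (sens.length : Int) else sm)
      = fun sm key => if cF key < sm then cF key else sm := by
    funext sm key
    simp only [pv_groups_getD, pv_sens_eq, hcF]
  rw [hbody, pv_groups_keys, ← hkl,
    show keyList.foldl (fun sm key => if cF key < sm then cF key else sm) (dataset.length : Int)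
      = (keyList.map cF).foldl (fun sm c => if c < sm then c else sm) (dataset.length : Int)
      from (List.foldl_map (f := cF) (g := fun sm c => if c < sm then c else sm)
        (l := keyList) (init := (dataset.length : Int))).symm]
  -- B side: the counting loop is Counter(first components of the distinct pairs)
  have hcnt : (PySem.Set.ofList pl).foldl (fun c p => c.insert p.1 (c.getD p.1 0 + 1)) PySem.Dict.empty
      = PySem.Dict.counter ((PySem.Set.ofList pl).map Prod.fst) := by
    rw [← PySem.Dict.foldl_insert_getD_add_one_eq_counter, List.foldl_map]
  rw [hcnt]
  have hvals : (PySem.Dict.counter ((PySem.Set.ofList pl).map Prod.fst)).values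
      = (PySem.Set.ofList ((PySem.Set.ofList pl).map Prod.fst)).map
          (fun k => ((((PySem.Set.ofList pl).map Prod.fst)).count k : Int)) := by
    simp only [PySem.Dict.values, PySem.Dict.items_counter, List.map_map]
    rfl
  have hqs : PySem.Set.ofList ((PySem.Set.ofList pl).map Prod.fst) = keyList := by
    rw [pv_ofList_map_ofList, hpl, List.map_map, hkl]
    rfl
  rw [hvals, hqs]
  have hcong : keyList.map (fun k => ((((PySem.Set.ofList pl).map Prod.fst)).count k : Int))
      = keyList.map cF := by
    apply List.map_congr_left
    intro q _
    exact pv_count_eq dataset QI SD q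
  rw [hcong]
  simp only [PySem.List.minD]
  rcases eq_or_ne dataset ([] : List (List (String × String))) with hds | hds
  · rw [hkl, hds]
    rfl
  · have hne : keyList.map cF ≠ [] := by
      obtain ⟨d0, t0, hdt⟩ := List.exists_cons_of_ne_nil hds
      intro h
      rw [List.map_eq_nil_iff, hkl, hdt] at h
      simp [PySem.Set.ofList_cons] at h
    have hb : ∀ c ∈ keyList.map cF, c ≤ (dataset.length : Int) := by
      intro c hc
      obtain ⟨k, _, rfl⟩ := List.mem_map.1 hc
      have h1 := PySem.Set.length_ofList_le
        ((dataset.filter (fun d => pvKeyA d QI == k)).map (fun d => pvKeyA d SD))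
      rw [List.length_map] at h1
      have h2 := List.length_filter_le (fun d => pvKeyA d QI == k) dataset
      simp only [hcF]
      exact_mod_cast le_trans h1 h2
    rw [pv_minfold (keyList.map cF) (dataset.length : Int) hne hb]
    rfl
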